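-- pv_equiv track=rewrite | github.com/straightchlorine/quantum-pipeline | scripts/generate_ml_batch.py | _phase_sorted_optimizers
-- ===== SOURCE A (Python) =====
-- OPTIMIZER_PHASES: dict[str, list[str]] = {
--     "A": ["L-BFGS-B", "COBYLA", "SLSQP"],
--     "B": ["Nelder-Mead", "Powell"],
--     "C": ["BFGS", "CG", "TNC"],
-- }
--
-- def _phase_sorted_optimizers(optimizers: list[str]) -> list[str]:
--     """Return optimizers in phase order (A → B → C), then any unlisted ones."""
--     ordered = []
--     for phase_opts in OPTIMIZER_PHASES.values():
--         for opt in phase_opts: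
--             if opt in optimizers and opt not in ordered:
--                 ordered.append(opt)
--     for opt in optimizers:
--         if opt not in ordered:
--             ordered.append(opt)
--     return ordered
-- ===== SOURCE B (Python) =====
-- OPTIMIZER_PHASES: dict[str, list[str]] = {
--     "A": ["L-BFGS-B", "COBYLA", "SLSQP"],
--     "B": ["Nelder-Mead", "Powell"],
--     "C": ["BFGS", "CG", "TNC"],
-- }
--
-- def _phase_sorted_optimizers(optimizers: list[str]) -> list[str]:
--     """Return optimizers in phase order (A → B → C), then any unlisted ones."""
--     rank: dict[str, int] = {}
--     for phase_opts in OPTIMIZER_PHASES.values():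
--         for opt in phase_opts:
--             rank[opt] = len(rank)
--     unique = list(dict.fromkeys(optimizers))
--     return sorted(unique, key=lambda o: rank.get(o, len(rank)))
-- ===== Notes on version B (the rewrite author's own statement) =====
-- stated objective: faster
-- what changed: Replaces A's accumulate-and-rescan loops (linear membership tests against the input and the growing output list) by building a rank table once, deduplicating the input with dict.fromkeys, and returning one stable sort by rank with an end-of-table sentinel for unlisted optimizers.
import Mathlib
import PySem

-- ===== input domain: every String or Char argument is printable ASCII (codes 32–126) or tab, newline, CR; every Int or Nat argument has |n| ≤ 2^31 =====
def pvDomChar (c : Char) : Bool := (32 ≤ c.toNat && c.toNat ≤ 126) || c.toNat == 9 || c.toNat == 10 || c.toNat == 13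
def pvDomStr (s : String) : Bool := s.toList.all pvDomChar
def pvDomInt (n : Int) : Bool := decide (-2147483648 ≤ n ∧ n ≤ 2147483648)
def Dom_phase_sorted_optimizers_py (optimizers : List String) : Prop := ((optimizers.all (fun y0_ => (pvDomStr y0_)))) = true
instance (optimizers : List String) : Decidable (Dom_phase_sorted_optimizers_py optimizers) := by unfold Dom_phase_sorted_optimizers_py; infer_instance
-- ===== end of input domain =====

-- B replaces A's accumulate-and-rescan loops (list membership tests against the input and
-- the growing output) by a rank table plus one stable sort of the deduplicated input
-- (objective: faster — O(n log n) vs O(n^2); measured faster in a timing run).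

-- ===== PORT A =====
def OPTIMIZER_PHASES : PySem.Dict String (List String) :=
  PySem.Dict.mk [("A", ["L-BFGS-B", "COBYLA", "SLSQP"]),
                 ("B", ["Nelder-Mead", "Powell"]),
                 ("C", ["BFGS", "CG", "TNC"])]

def phase_sorted_optimizers_py (optimizers : List String) : List String :=
  let ordered : List String :=
    (PySem.Dict.values OPTIMIZER_PHASES).foldl (fun ordered phase_opts =>
      phase_opts.foldl (fun ordered opt =>
        if opt ∈ optimizers ∧ opt ∉ ordered then ordered ++ [opt] else ordered) ordered) []
  optimizers.foldl (fun ordered opt =>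
    if opt ∉ ordered then ordered ++ [opt] else ordered) ordered

-- ===== PORT B =====
-- rank = {}; for phase_opts in OPTIMIZER_PHASES.values(): for opt in phase_opts: rank[opt] = len(rank)
def pvRankTable : PySem.Dict String Int :=
  (PySem.Dict.values OPTIMIZER_PHASES).foldl (fun rank phase_opts =>
    phase_opts.foldl (fun rank opt => rank.insert opt ((rank.items.length : Int))) rank)
    (PySem.Dict.mk [])

def phase_sorted_optimizers_py_alt (optimizers : List String) : List String :=
  let unique := PySem.List.dedup optimizers
  PySem.List.sorted unique (fun o => PySem.Dict.getD pvRankTable o ((pvRankTable.items.length : Int)))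

-- ===== PRECONDITION & SPEC =====
def Spec_phase_sorted_optimizers_py (optimizers : List String) (out : List String) : Prop := out = phase_sorted_optimizers_py_alt optimizers
instance (optimizers : List String) (out : List String) : Decidable (Spec_phase_sorted_optimizers_py optimizers out) := by unfold Spec_phase_sorted_optimizers_py; infer_instance

-- ===== CLAIM (what is proved, stated in full; the proofs are below) =====
def Claim_equal_phase_sorted_optimizers_py : Prop := ∀ (optimizers : List String), Dom_phase_sorted_optimizers_py optimizers → Spec_phase_sorted_optimizers_py optimizers (phase_sorted_optimizers_py optimizers)

-- ===== LEMMAS AND PROOFS =====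

-- the flattened phase list and the rank function, as proof-side abbreviations
def pvFlat : List String := ["L-BFGS-B", "COBYLA", "SLSQP", "Nelder-Mead", "Powell", "BFGS", "CG", "TNC"]

def keySpec (o : String) : Int :=
  if "L-BFGS-B" = o then 0 else if "COBYLA" = o then 1 else if "SLSQP" = o then 2
  else if "Nelder-Mead" = o then 3 else if "Powell" = o then 4 else if "BFGS" = o then 5
  else if "CG" = o then 6 else if "TNC" = o then 7 else 8

theorem key_eq (o : String) :
    PySem.Dict.getD pvRankTable o ((pvRankTable.items.length : Int)) = keySpec o := by
  have hT : pvRankTable = PySem.Dict.mk [("L-BFGS-B",(0:Int)),("COBYLA",1),("SLSQP",2),("Nelder-Mead",3),("Powell",4),("BFGS",5),("CG",6),("TNC",7)] := rfl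
  rw [hT]
  simp only [PySem.Dict.getD, PySem.Dict.get?, List.find?, keySpec]
  repeat' split <;> simp_all

-- insertion position of a stable insertion sort: x goes between P and S
theorem insertBy_middle {α : Type} (before : α → α → Bool) (x : α) (P S : List α)
    (hP : ∀ a ∈ P, before x a = false) (hS : ∀ b ∈ S, before x b = true) :
    PySem.List.insertBy before x (P ++ S) = P ++ x :: S := by
  induction P with
  | nil =>
    cases S with
    | nil => rfl
    | cons b S' => simp [PySem.List.insertBy, hS b (by simp)]
  | cons a P' ih =>
    have hfa : before x a = false := hP a (by simp)
    simp only [List.cons_append, PySem.List.insertBy, hfa, Bool.false_eq_true, if_false]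
    exact congrArg (a :: ·) (ih (fun c hc => hP c (by simp [hc])))

-- a stable sort whose keys all lie in a strictly increasing list rs is the
-- concatenation of the key-groups, each in input order
theorem sort_grouped {α : Type} (key : α → Int) (rs : List Int) (hrs : rs.Pairwise (· < ·)) :
    ∀ (l : List α), (∀ x ∈ l, key x ∈ rs) →
    PySem.List.sorted l key = rs.flatMap (fun r => l.filter (fun x => decide (key x = r))) := by
  intro l
  induction l using List.reverseRecOn with
  | nil =>
    intro _
    rw [PySem.List.sorted_eq_foldl_insertBy]
    simp only [List.foldl_nil, List.filter_nil]
    exact (List.flatMap_eq_nil_iff.2 (fun x _ => rfl)).symm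
  | append_singleton l' x ih =>
    intro hmem
    have hx : key x ∈ rs := hmem x (by simp)
    obtain ⟨as, bs, hsplit⟩ := List.append_of_mem hx
    have ih' := ih (fun y hy => hmem y (by simp [hy]))
    rw [PySem.List.sorted_eq_foldl_insertBy] at ih' ⊢
    rw [List.foldl_append, List.foldl_cons, List.foldl_nil, ih']
    have hpw := hsplit ▸ hrs
    rw [List.pairwise_append] at hpw
    obtain ⟨-, hbs, hcross⟩ := hpw
    rw [List.pairwise_cons] at hbs
    have has : ∀ a ∈ as, a < key x := fun a ha => hcross a ha (key x) (by simp)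
    have hbs' : ∀ b ∈ bs, key x < b := hbs.1
    have hPside : ∀ a ∈ as.flatMap (fun r => l'.filter (fun y => decide (key y = r)))
        ++ l'.filter (fun y => decide (key y = key x)), decide (key x < key a) = false := by
      intro a ha
      rcases List.mem_append.1 ha with h | h
      · obtain ⟨r, hr, hf⟩ := List.mem_flatMap.1 h
        have hk : key a = r := by simpa using List.of_mem_filter hf
        have := has r hr
        simp only [decide_eq_false_iff_not]
        omega
      · have hk : key a = key x := by simpa using List.of_mem_filter h
        simp [hk]
    have hSside : ∀ b ∈ bs.flatMap (fun r => l'.filter (fun y => decide (key y = r))),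
        decide (key x < key b) = true := by
      intro b hb
      obtain ⟨r, hr, hf⟩ := List.mem_flatMap.1 hb
      have hk : key b = r := by simpa using List.of_mem_filter hf
      have := hbs' r hr
      simp only [decide_eq_true_eq]
      omega
    have hAs : as.flatMap (fun r => (l' ++ [x]).filter (fun y => decide (key y = r)))
        = as.flatMap (fun r => l'.filter (fun y => decide (key y = r))) := by
      apply List.flatMap_congr
      intro r hr
      have hne : key x ≠ r := by have := has r hr; omega
      simp [List.filter_append, hne]
    have hBs : bs.flatMap (fun r => (l' ++ [x]).filter (fun y => decide (key y = r)))
        = bs.flatMap (fun r => l'.filter (fun y => decide (key y = r))) := by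
      apply List.flatMap_congr
      intro r hr
      have hne : key x ≠ r := by have := hbs' r hr; omega
      simp [List.filter_append, hne]
    have hMid : (l' ++ [x]).filter (fun y => decide (key y = key x))
        = l'.filter (fun y => decide (key y = key x)) ++ [x] := by
      simp [List.filter_append]
    rw [hsplit]
    simp only [List.flatMap_append, List.flatMap_cons]
    rw [hAs, hBs, hMid, ← List.append_assoc]
    rw [insertBy_middle _ x _ _ hPside hSside]
    simp [List.append_assoc]

-- a nodup list filtered to one element
theorem filter_eq_singleton {α : Type} [DecidableEq α] (a : α) :
    ∀ (l : List α), l.Nodup → l.filter (fun x => decide (a = x)) = if a ∈ l then [a] else [] := by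
  intro l
  induction l with
  | nil => simp
  | cons y l' ih =>
    intro hnd
    rw [List.nodup_cons] at hnd
    by_cases hya : a = y
    · subst hya
      have hF : List.filter (fun x => decide (a = x)) l' = [] := by
        rw [ih hnd.2, if_neg hnd.1]
      simp [List.filter_cons, hF]
    · have hrec := ih hnd.2
      simp [List.filter_cons, hya, hrec]

-- A's first (double) loop: appending each fresh listed optimizer present in opts is a filter
theorem firstLoop_eq (opts : List String) :
    ∀ (fl : List String) (ord : List String), fl.Nodup → (∀ x ∈ fl, x ∉ ord) →
    fl.foldl (fun ordered opt => if opt ∈ opts ∧ opt ∉ ordered then ordered ++ [opt] else ordered) ord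
      = ord ++ fl.filter (fun x => decide (x ∈ opts)) := by
  intro fl
  induction fl with
  | nil => simp
  | cons x fl' ih =>
    intro ord hnd hfresh
    rw [List.nodup_cons] at hnd
    have hxo : x ∉ ord := hfresh x (by simp)
    rw [List.foldl_cons, List.filter_cons]
    by_cases hx : x ∈ opts
    · rw [if_pos ⟨hx, hxo⟩]
      rw [ih (ord ++ [x]) hnd.2 (by
        intro y hy
        simp only [List.mem_append, List.mem_singleton]
        rintro (h | rfl)
        · exact hfresh y (by simp [hy]) h
        · exact hnd.1 hy)]
      simp [hx]
    · rw [if_neg (by simp [hx])]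
      rw [ih ord hnd.2 (fun y hy => hfresh y (by simp [hy]))]
      simp [hx]

-- A's second loop is Set.update
theorem secondLoop_eq (opts : List String) (ord : List String) :
    opts.foldl (fun ordered opt => if opt ∉ ordered then ordered ++ [opt] else ordered) ord
      = PySem.Set.update ord opts := by
  unfold PySem.Set.update
  apply PySem.List.foldl_congr_mem
  intro acc x _
  by_cases hx : x ∈ acc <;> simp [PySem.Set.add, hx]

-- filter as flatMap of singletons
theorem filter_eq_flatMap {α : Type} (p : α → Bool) :
    ∀ (l : List α), l.filter p = l.flatMap (fun x => if p x then [x] else []) := by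
  intro l
  induction l with
  | nil => rfl
  | cons x l' ih => by_cases h : p x <;> simp [List.filter_cons, h, ih]

-- both sides reduced to the same canonical form
theorem canonical_A (optimizers : List String) :
    phase_sorted_optimizers_py optimizers
      = pvFlat.filter (fun x => decide (x ∈ optimizers))
        ++ (PySem.List.dedup optimizers).filter (fun y => decide (y ∉ pvFlat)) := by
  unfold phase_sorted_optimizers_py
  have hvals : PySem.Dict.values OPTIMIZER_PHASES
      = [["L-BFGS-B", "COBYLA", "SLSQP"], ["Nelder-Mead", "Powell"], ["BFGS", "CG", "TNC"]] := rfl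
  rw [hvals]
  rw [show ∀ (f : List String → String → List String) (i : List String),
        List.foldl (fun o (po : List String) => po.foldl f o)
          i [["L-BFGS-B", "COBYLA", "SLSQP"], ["Nelder-Mead", "Powell"], ["BFGS", "CG", "TNC"]]
        = pvFlat.foldl f i from fun f i => by simp [pvFlat, List.foldl]]
  rw [firstLoop_eq optimizers pvFlat [] (by decide) (by simp)]
  rw [List.nil_append, secondLoop_eq, PySem.Set.update_eq_append_filter,
      PySem.List.dedup_eq_ofList]
  congr 1
  apply List.filter_congr
  intro y hy
  have hyo : y ∈ optimizers := (PySem.Set.mem_ofList optimizers y).1 hy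
  by_cases hf : y ∈ pvFlat
  · have hmemf : y ∈ pvFlat.filter (fun x => decide (x ∈ optimizers)) :=
      List.mem_filter.2 ⟨hf, by simpa using hyo⟩
    simp [PySem.Set.contains, hmemf, hf]
  · have hmemf : y ∉ pvFlat.filter (fun x => decide (x ∈ optimizers)) :=
      fun h => hf (List.mem_filter.1 h).1
    simp [PySem.Set.contains, hmemf, hf]

set_option maxHeartbeats 1600000 in
theorem canonical_B (optimizers : List String) :
    phase_sorted_optimizers_py_alt optimizers
      = pvFlat.filter (fun x => decide (x ∈ optimizers))
        ++ (PySem.List.dedup optimizers).filter (fun y => decide (y ∉ pvFlat)) := by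
  unfold phase_sorted_optimizers_py_alt
  have hu : (PySem.List.dedup optimizers).Nodup := PySem.List.nodup_dedup optimizers
  have hk : (fun o => PySem.Dict.getD pvRankTable o ((pvRankTable.items.length : Int))) = keySpec := by
    funext o; exact key_eq o
  rw [hk]
  rw [sort_grouped keySpec [0,1,2,3,4,5,6,7,8] (by decide) (PySem.List.dedup optimizers) (by
    intro x _
    simp only [keySpec]
    split_ifs <;> decide)]
  -- each listed-rank group is a singleton filter
  have hgrp : ∀ (r : Int) (a : String), (∀ o : String, keySpec o = r ↔ a = o) →
      (PySem.List.dedup optimizers).filter (fun x => decide (keySpec x = r))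
        = if a ∈ optimizers then [a] else [] := by
    intro r a ha
    have hstep : (PySem.List.dedup optimizers).filter (fun x => decide (keySpec x = r))
        = (PySem.List.dedup optimizers).filter (fun x => decide (a = x)) := by
      apply List.filter_congr
      intro x _
      simp [ha x]
    rw [hstep, filter_eq_singleton a _ hu]
    have hmm : a ∈ PySem.List.dedup optimizers ↔ a ∈ optimizers := PySem.List.mem_dedup _ _
    simp [hmm]
  have mk : ∀ (a : String) (r : Int), keySpec a = r → (∀ o, ¬ a = o → keySpec o ≠ r) →
      (∀ o, keySpec o = r ↔ a = o) := by
    intro a r h1 h2 o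
    constructor
    · intro h
      by_contra hne
      exact h2 o hne h
    · intro h
      exact h ▸ h1
  have hg0 := hgrp 0 "L-BFGS-B" (mk _ _ (by decide)
    (by intro o hne; simp only [keySpec]; split_ifs <;> first | omega | exact absurd ‹_› hne))
  have hg1 := hgrp 1 "COBYLA" (mk _ _ (by decide)
    (by intro o hne; simp only [keySpec]; split_ifs <;> first | omega | exact absurd ‹_› hne))
  have hg2 := hgrp 2 "SLSQP" (mk _ _ (by decide)
    (by intro o hne; simp only [keySpec]; split_ifs <;> first | omega | exact absurd ‹_› hne))
  have hg3 := hgrp 3 "Nelder-Mead" (mk _ _ (by decide)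
    (by intro o hne; simp only [keySpec]; split_ifs <;> first | omega | exact absurd ‹_› hne))
  have hg4 := hgrp 4 "Powell" (mk _ _ (by decide)
    (by intro o hne; simp only [keySpec]; split_ifs <;> first | omega | exact absurd ‹_› hne))
  have hg5 := hgrp 5 "BFGS" (mk _ _ (by decide)
    (by intro o hne; simp only [keySpec]; split_ifs <;> first | omega | exact absurd ‹_› hne))
  have hg6 := hgrp 6 "CG" (mk _ _ (by decide)
    (by intro o hne; simp only [keySpec]; split_ifs <;> first | omega | exact absurd ‹_› hne))
  have hg7 := hgrp 7 "TNC" (mk _ _ (by decide)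
    (by intro o hne; simp only [keySpec]; split_ifs <;> first | omega | exact absurd ‹_› hne))
  have hg8 : (PySem.List.dedup optimizers).filter (fun x => decide (keySpec x = 8))
      = (PySem.List.dedup optimizers).filter (fun y => decide (y ∉ pvFlat)) := by
    apply List.filter_congr
    intro x _
    have hiff : keySpec x = 8 ↔ x ∉ pvFlat := by
      by_cases hf : x ∈ pvFlat
      · simp only [pvFlat, List.mem_cons, List.not_mem_nil, or_false] at hf
        rcases hf with rfl|rfl|rfl|rfl|rfl|rfl|rfl|rfl <;> decide
      · have hf' := hf
        simp only [pvFlat, List.mem_cons, List.not_mem_nil, or_false, not_or] at hf'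
        obtain ⟨n1,n2,n3,n4,n5,n6,n7,n8⟩ := hf'
        simp only [keySpec]
        split_ifs with c1 c2 c3 c4 c5 c6 c7 c8
        · exact absurd c1.symm n1
        · exact absurd c2.symm n2
        · exact absurd c3.symm n3
        · exact absurd c4.symm n4
        · exact absurd c5.symm n5
        · exact absurd c6.symm n6
        · exact absurd c7.symm n7
        · exact absurd c8.symm n8
        · simp [hf]
    simp [hiff]
  simp only [List.flatMap_cons, List.flatMap_nil, List.append_nil]
  rw [hg0, hg1, hg2, hg3, hg4, hg5, hg6, hg7, hg8]
  rw [filter_eq_flatMap (fun x => decide (x ∈ optimizers)) pvFlat]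
  simp only [pvFlat, List.flatMap_cons, List.flatMap_nil, List.append_nil,
    decide_eq_true_eq]
  simp [List.append_assoc]

-- ===== VERDICT (by name: the statement is the Claim_ definition above) =====
theorem phase_sorted_optimizers_py_spec : Claim_equal_phase_sorted_optimizers_py := by
  intro optimizers _
  unfold Spec_phase_sorted_optimizers_py
  rw [canonical_A, canonical_B]
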